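-- pv_equiv track=rewrite | github.com/1shashwatharsh1/Voice-Based-Cognitive-Decline-Pattern-Detection | deployment_package/src/nlp_processor.py | _count_word_repetitions
-- ===== SOURCE A (Python) =====
-- from typing import Dict, List
--
-- def _count_word_repetitions(words: List[str]) -> int:
--     """Count repeated words within a short window."""
--     repetitions = 0
--     window_size = 5
--
--     for i in range(len(words) - window_size):
--         window = words[i:i + window_size]
--         for word in set(window):
--             if window.count(word) > 1:
--                 repetitions += 1
--
--     return repetitions
-- ===== SOURCE B (Python) =====
-- from typing import List
--
-- def _count_word_repetitions(words: List[str]) -> int: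
--     """Count repeated words within a short window (sliding-window counter, one pass)."""
--     n = len(words)
--     if n <= 5:
--         return 0
--     counts = {}
--     dups = 0
--     for w in words[:5]:
--         c = counts.get(w, 0) + 1
--         counts[w] = c
--         if c == 2:
--             dups += 1
--     total = dups
--     for i in range(1, n - 5):
--         out = words[i - 1]
--         c = counts.get(out, 0) - 1
--         counts[out] = c
--         if c == 1:
--             dups -= 1
--         new = words[i + 4]
--         c = counts.get(new, 0) + 1
--         counts[new] = c
--         if c == 2:
--             dups += 1
--         total += dups
--     return total
-- ===== Notes on version B (the rewrite author's own statement) =====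
-- stated objective: faster
-- what changed: A rebuilds every 5-word window from scratch (slice, set(), and a full-window .count() scan per distinct word); B makes one pass with a sliding multiset counter and a running `dups` tally of words currently duplicated, updated in O(1) as one word leaves and one enters the window.
import Mathlib
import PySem

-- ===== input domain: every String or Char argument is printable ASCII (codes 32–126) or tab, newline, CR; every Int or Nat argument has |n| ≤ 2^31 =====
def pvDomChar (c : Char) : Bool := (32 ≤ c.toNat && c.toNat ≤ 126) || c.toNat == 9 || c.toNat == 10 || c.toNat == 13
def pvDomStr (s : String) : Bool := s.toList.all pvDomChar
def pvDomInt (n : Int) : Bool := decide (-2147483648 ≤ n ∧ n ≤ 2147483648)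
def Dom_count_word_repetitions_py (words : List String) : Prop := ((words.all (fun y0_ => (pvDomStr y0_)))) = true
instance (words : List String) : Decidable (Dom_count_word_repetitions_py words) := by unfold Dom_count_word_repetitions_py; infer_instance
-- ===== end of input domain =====

-- B replaces A's per-window rebuild (slice + set() + full-window .count() scans) by a single
-- pass with a sliding multiset counter and a running duplicate tally updated in O(1) per slide
-- (objective: faster, by a constant factor measured on large inputs).


-- ===== PORT A =====
def count_word_repetitions_py (words : List String) : Int :=
  (PySem.List.pyRange 0 ((words.length : Int) - 5) 1).foldl
    (fun repetitions i =>
      let window := PySem.List.slice words (some i) (some (i + 5))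
      (PySem.Set.ofList window).foldl
        (fun repetitions word => if window.count word > 1 then repetitions + 1 else repetitions)
        repetitions)
    0

-- ===== PORT B =====
-- body of B's first loop: add word w to the window counter, bump dups when its count reaches 2
def pvStep0 (st : PySem.Dict String Int × Int) (w : String) : PySem.Dict String Int × Int :=
  let c := st.1.getD w 0 + 1
  (st.1.insert w c, if c == 2 then st.2 + 1 else st.2)

-- body of B's sliding loop: words[i-1] leaves the window, words[i+4] enters, total accumulates dups
def pvStepB (words : List String) (st : PySem.Dict String Int × Int × Int) (i : Int) :
    PySem.Dict String Int × Int × Int :=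
  let outw := PySem.List.pyGetD words (i - 1) ""
  let c1 := st.1.getD outw 0 - 1
  let d1 := st.1.insert outw c1
  let dups1 := if c1 == 1 then st.2.1 - 1 else st.2.1
  let neww := PySem.List.pyGetD words (i + 4) ""
  let c2 := d1.getD neww 0 + 1
  let d2 := d1.insert neww c2
  let dups2 := if c2 == 2 then dups1 + 1 else dups1
  (d2, dups2, st.2.2 + dups2)

def count_word_repetitions_py_alt (words : List String) : Int :=
  if words.length ≤ 5 then 0
  else
    let st0 := (PySem.List.slice words none (some 5)).foldl pvStep0 (PySem.Dict.empty, 0)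
    let st := (PySem.List.pyRange 1 ((words.length : Int) - 5) 1).foldl (pvStepB words)
      (st0.1, st0.2, st0.2)
    st.2.2

-- ===== PRECONDITION & SPEC =====
def Spec_count_word_repetitions_py (words : List String) (out : Int) : Prop := out = count_word_repetitions_py_alt words
instance (words : List String) (out : Int) : Decidable (Spec_count_word_repetitions_py words out) := by unfold Spec_count_word_repetitions_py; infer_instance

-- ===== CLAIM (what is proved, stated in full; the proofs are below) =====
def Claim_equal_count_word_repetitions_py : Prop := ∀ (words : List String), Dom_count_word_repetitions_py words → Spec_count_word_repetitions_py words (count_word_repetitions_py words)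

-- ===== LEMMAS AND PROOFS =====

-- the window starting at position j
def pvWin (words : List String) (j : Nat) : List String := (words.drop j).take 5

-- the 4-word overlap of consecutive windows j-1 and j
def pvMid (words : List String) (j : Nat) : List String := (words.drop j).take 4

-- A's per-window value: the number of distinct words occurring at least twice in the window.
def pvNA (l : List String) : Nat :=
  (PySem.Set.ofList l).countP (fun x => decide (l.count x > 1))

-- Append step for pvNA.
theorem pvNA_append (l : List String) (w : String) :
    pvNA (l ++ [w]) = pvNA l + (if l.count w = 1 then 1 else 0) := by
  have hof : PySem.Set.ofList (l ++ [w]) = PySem.Set.add (PySem.Set.ofList l) w := by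
    rw [PySem.Set.ofList_eq_foldl, PySem.Set.ofList_eq_foldl, List.foldl_append]
    rfl
  have hcount : ∀ x : String, List.count x (l ++ [w]) = List.count x l + (if w = x then 1 else 0) := by
    intro x
    simp [List.count_append, List.count_cons]
  unfold pvNA
  rw [hof]
  by_cases hw : w ∈ l
  · have hwS : w ∈ PySem.Set.ofList l := (PySem.Set.mem_ofList l w).2 hw
    rw [PySem.Set.add_of_mem hwS]
    have hperm : List.Perm (PySem.Set.ofList l) (w :: (PySem.Set.ofList l).erase w) :=
      List.perm_cons_erase hwS
    have hmem : ∀ x ∈ (PySem.Set.ofList l).erase w, x ≠ w :=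
      fun x hx => (((PySem.Set.nodup_ofList l).mem_erase_iff).1 hx).1
    have htail : ∀ (p q : String → Bool), (∀ x, x ≠ w → p x = q x) →
        ((PySem.Set.ofList l).erase w).countP p = ((PySem.Set.ofList l).erase w).countP q := by
      intro p q h
      exact List.Perm.countP_congr (List.Perm.refl _) (fun x hx => h x (hmem x hx))
    rw [hperm.countP_eq, hperm.countP_eq, List.countP_cons, List.countP_cons]
    rw [htail (fun x => decide (List.count x (l ++ [w]) > 1)) (fun x => decide (List.count x l > 1))
      (by intro x hxw; simp [hcount, if_neg (Ne.symm hxw)])]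
    have hwc : 1 ≤ l.count w := List.one_le_count_iff.2 hw
    have hcw : List.count w (l ++ [w]) = List.count w l + 1 := by simp [hcount]
    by_cases h1 : l.count w = 1
    · simp [hcw, h1]
    · have : 1 < l.count w := by omega
      simp [hcw, h1, this, Nat.lt_add_right 1 this]
  · have hwS : w ∉ PySem.Set.ofList l := fun h => hw ((PySem.Set.mem_ofList l w).1 h)
    rw [PySem.Set.add_of_not_mem hwS]
    have hwc : l.count w = 0 := List.count_eq_zero.2 hw
    rw [List.countP_append]
    have hsame : (PySem.Set.ofList l).countP (fun x => decide (List.count x (l ++ [w]) > 1)) =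
        (PySem.Set.ofList l).countP (fun x => decide (List.count x l > 1)) := by
      refine List.Perm.countP_congr (List.Perm.refl _) (fun x hx => ?_)
      have hxw : x ≠ w := fun h => hw (h ▸ (PySem.Set.mem_ofList l x).1 hx)
      simp [hcount, if_neg (Ne.symm hxw)]
    rw [hsame]
    simp [hcount, hwc]

-- pvNA only depends on the multiset of the window.
theorem pvNA_perm (l l' : List String) (h : l.Perm l') : pvNA l = pvNA l' := by
  unfold pvNA
  have hs : (PySem.Set.ofList l).Perm (PySem.Set.ofList l') := by
    rw [List.perm_ext_iff_of_nodup (PySem.Set.nodup_ofList l) (PySem.Set.nodup_ofList l')]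
    intro a
    rw [PySem.Set.mem_ofList, PySem.Set.mem_ofList]
    exact ⟨fun ha => h.mem_iff.1 ha, fun ha => h.mem_iff.2 ha⟩
  calc (PySem.Set.ofList l).countP (fun x => decide (l.count x > 1))
      = (PySem.Set.ofList l').countP (fun x => decide (l.count x > 1)) := hs.countP_eq _
    _ = _ := List.Perm.countP_congr (List.Perm.refl _) (fun x _ => by rw [h.count_eq])

-- Cons step for pvNA (remove the word leaving the window at the front).
theorem pvNA_cons (h : String) (t : List String) :
    pvNA (h :: t) = pvNA t + (if t.count h = 1 then 1 else 0) := by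
  rw [pvNA_perm _ _ (List.perm_append_singleton h t).symm, pvNA_append]

-- B's first loop builds the multiset counter and duplicate tally of the traversed prefix.
theorem pvStep0_foldl (l : List String) : ∀ (p : List String) (d : PySem.Dict String Int) (dups : Int),
    (∀ w, d.getD w 0 = (p.count w : Int)) → dups = (pvNA p : Int) →
    (∀ w, (l.foldl pvStep0 (d, dups)).1.getD w 0 = ((p ++ l).count w : Int)) ∧
      (l.foldl pvStep0 (d, dups)).2 = (pvNA (p ++ l) : Int) := by
  induction l with
  | nil => intro p d dups hd hdups; simpa using ⟨hd, hdups⟩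
  | cons w t ih =>
    intro p d dups hd hdups
    simp only [List.foldl_cons]
    have happ : p ++ w :: t = (p ++ [w]) ++ t := by simp
    rw [happ]
    apply ih
    · intro w'
      simp only [PySem.Dict.getD_insert]
      by_cases hww : w' = w
      · subst hww
        simp [hd w', List.count_append]
      · simp [hww, hd w', List.count_append, Ne.symm hww]
    · simp only [hd w, hdups, pvNA_append]
      by_cases h1 : p.count w = 1
      · simp [h1]
      · have h1' : ¬ ((p.count w : Int) + 1 == 2) := by
          simp only [beq_iff_eq]
          intro hc
          exact h1 (by exact_mod_cast (by linarith : (p.count w : Int) = 1))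
        simp [h1, h1']

-- One slide of B's window: the counter and tallies move from window j-1 to window j.
theorem pvStepB_correct (words : List String) (j : Nat) (d : PySem.Dict String Int)
    (dups total : Int) (hj : 1 ≤ j) (hj6 : j + 6 ≤ words.length)
    (hd : ∀ w, d.getD w 0 = ((pvWin words (j - 1)).count w : Int))
    (hdups : dups = (pvNA (pvWin words (j - 1)) : Int)) :
    (∀ w, (pvStepB words (d, dups, total) (j : Int)).1.getD w 0 = ((pvWin words j).count w : Int)) ∧
      (pvStepB words (d, dups, total) (j : Int)).2.1 = (pvNA (pvWin words j) : Int) ∧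
      (pvStepB words (d, dups, total) (j : Int)).2.2 = total + (pvNA (pvWin words j) : Int) := by
  have hlt1 : j - 1 < words.length := by omega
  have hlt4 : j + 4 < words.length := by omega
  set outw := words.getD (j - 1) "" with houtw
  set neww := words.getD (j + 4) "" with hneww
  set mid := pvMid words j with hmid
  have hcons : pvWin words (j - 1) = outw :: mid := by
    rw [houtw, hmid]
    unfold pvWin pvMid
    rw [List.drop_eq_getElem_cons hlt1, show j - 1 + 1 = j by omega,
      List.getD_eq_getElem words "" hlt1]
    rfl
  have hsnoc : pvWin words j = mid ++ [neww] := by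
    rw [hneww, hmid]
    unfold pvWin pvMid
    rw [show (5 : Nat) = 4 + 1 from rfl, List.take_add_one]
    congr 1
    rw [List.getElem?_drop, List.getElem?_eq_getElem hlt4, List.getD_eq_getElem words "" hlt4]
    rfl
  have hout : PySem.List.pyGetD words ((j : Int) - 1) "" = outw := by
    rw [show (j : Int) - 1 = ((j - 1 : Nat) : Int) by omega, PySem.List.pyGetD_natCast]
  have hnew : PySem.List.pyGetD words ((j : Int) + 4) "" = neww := by
    rw [show (j : Int) + 4 = ((j + 4 : Nat) : Int) by omega, PySem.List.pyGetD_natCast]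
  have hc1 : d.getD outw 0 - 1 = (mid.count outw : Int) := by
    rw [hd outw, hcons, List.count_cons]
    simp
  set d1 := d.insert outw (d.getD outw 0 - 1) with hd1def
  have hd1 : ∀ w, d1.getD w 0 = (mid.count w : Int) := by
    intro w
    rw [hd1def, PySem.Dict.getD_insert]
    by_cases hww : w = outw
    · rw [if_pos hww, hc1, hww]
    · have hww' : ¬ outw = w := fun hh => hww hh.symm
      rw [if_neg hww, hd w, hcons, List.count_cons]
      simp [hww']
  set dups1 := if (d.getD outw 0 - 1) == 1 then dups - 1 else dups with hdups1def
  have hdups1 : dups1 = (pvNA mid : Int) := by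
    rw [hdups1def, hc1, hdups, hcons, pvNA_cons]
    by_cases h1 : mid.count outw = 1
    · simp [h1]
    · have hne : ¬ (((mid.count outw : Int) == 1) = true) := by
        simp only [beq_iff_eq]
        exact_mod_cast h1
      simp [h1, hne]
  set c2 := d1.getD neww 0 + 1 with hc2def
  have hc2 : c2 = (mid.count neww : Int) + 1 := by rw [hc2def, hd1 neww]
  set d2 := d1.insert neww c2 with hd2def
  have hd2 : ∀ w, d2.getD w 0 = ((mid ++ [neww]).count w : Int) := by
    intro w
    rw [hd2def, PySem.Dict.getD_insert]
    by_cases hww : w = neww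
    · rw [if_pos hww, hc2, hww, List.count_append, List.count_cons]
      simp
    · have hww' : ¬ neww = w := fun hh => hww hh.symm
      rw [if_neg hww, hd1 w, List.count_append, List.count_cons]
      simp [hww']
  set dups2 := if c2 == 2 then dups1 + 1 else dups1 with hdups2def
  have hdups2 : dups2 = (pvNA (mid ++ [neww]) : Int) := by
    rw [hdups2def, hc2, hdups1, pvNA_append]
    by_cases h1 : mid.count neww = 1
    · simp [h1]
    · have hne : ¬ (((mid.count neww : Int) + 1 == 2) = true) := by
        simp only [beq_iff_eq]
        intro hc
        exact h1 (by exact_mod_cast (by linarith : (mid.count neww : Int) = 1))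
      simp [h1, hne]
  have hstep : pvStepB words (d, dups, total) (j : Int) = (d2, dups2, total + dups2) := by
    simp only [pvStepB, hout, hnew]
    rfl
  refine ⟨fun w => ?_, ?_, ?_⟩
  · rw [hstep, hsnoc]
    exact hd2 w
  · rw [hstep, hsnoc]
    exact hdups2
  · rw [hstep, hsnoc, hdups2]

-- B's sliding loop accumulates the per-window duplicate counts of all remaining windows.
theorem pvStepB_foldl (words : List String) (k : Nat) :
    ∀ (j : Nat) (d : PySem.Dict String Int) (dups total : Int),
    1 ≤ j → j + k + 5 = words.length →
    (∀ w, d.getD w 0 = ((pvWin words (j - 1)).count w : Int)) →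
    dups = (pvNA (pvWin words (j - 1)) : Int) →
    ((PySem.List.pyRange (j : Int) ((words.length : Int) - 5) 1).foldl (pvStepB words)
        (d, dups, total)).2.2
      = total + ((List.range k).map (fun t => (pvNA (pvWin words (j + t)) : Int))).sum := by
  induction k with
  | zero =>
    intro j d dups total hj hlen hd hdups
    rw [PySem.List.pyRange_one_eq_nil (by omega)]
    simp
  | succ k ih =>
    intro j d dups total hj hlen hd hdups
    have hjn : (j : Int) < (words.length : Int) - 5 := by omega
    rw [PySem.List.pyRange_one_cons hjn, List.foldl_cons]
    obtain ⟨hd', hdups', htot⟩ := pvStepB_correct words j d dups total hj (by omega) hd hdups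
    rcases hst : pvStepB words (d, dups, total) (j : Int) with ⟨d2, dups2, total2⟩
    rw [hst] at hd' hdups' htot
    simp only at hd' hdups' htot
    have ihj := ih (j + 1) d2 dups2 total2 (by omega) (by omega)
      (by simpa using hd') (by simpa using hdups')
    push_cast at ihj
    rw [ihj, htot]
    have hsum : ((List.range (k + 1)).map (fun t => (pvNA (pvWin words (j + t)) : Int))).sum
        = (pvNA (pvWin words j) : Int)
          + ((List.range k).map (fun t => (pvNA (pvWin words (j + 1 + t)) : Int))).sum := by
      rw [List.range_succ_eq_map, List.map_cons, List.sum_cons, List.map_map]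
      simp only [Nat.add_zero]
      congr 1
      refine congrArg List.sum (List.map_congr_left ?_)
      intro t ht
      simp only [Function.comp_apply]
      rw [show j + (t + 1) = j + 1 + t by omega]
    rw [hsum]
    ring

-- A is the sum of the per-window duplicate counts.
theorem A_eq_sum (words : List String) :
    count_word_repetitions_py words
      = ((List.range ((words.length : Int) - 5).toNat).map
          (fun i => (pvNA (pvWin words i) : Int))).sum := by
  unfold count_word_repetitions_py
  have h1 : (PySem.List.pyRange 0 ((words.length : Int) - 5) 1).foldl
      (fun repetitions i =>
        let window := PySem.List.slice words (some i) (some (i + 5))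
        (PySem.Set.ofList window).foldl
          (fun repetitions word => if window.count word > 1 then repetitions + 1 else repetitions)
          repetitions)
      0
    = (PySem.List.pyRange 0 ((words.length : Int) - 5) 1).foldl
      (fun acc i => acc + (pvNA (PySem.List.slice words (some i) (some (i + 5))) : Int)) 0 := by
    apply PySem.List.foldl_congr_mem
    intro acc i _
    rw [PySem.List.foldl_ite_add_one]
    rfl
  rw [h1, PySem.List.foldl_add, PySem.List.pyRange_one, List.map_map]
  rw [zero_add, Int.sub_zero]
  refine congrArg List.sum (List.map_congr_left ?_)
  intro k hk
  simp only [Function.comp_apply, zero_add]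
  have e2 : (k : Int) + 5 = (((k + 5) : Nat) : Int) := by push_cast; ring
  rw [e2, PySem.List.slice_natCast, show k + 5 - k = 5 by omega]
  rfl

-- B computes the same sum whenever at least one window exists.
theorem B_eq_sum (words : List String) (h : ¬ words.length ≤ 5) :
    count_word_repetitions_py_alt words
      = ((List.range (words.length - 5)).map (fun i => (pvNA (pvWin words i) : Int))).sum := by
  unfold count_word_repetitions_py_alt
  rw [if_neg h]
  show ((PySem.List.pyRange 1 ((words.length : Int) - 5) 1).foldl (pvStepB words)
      (((PySem.List.slice words none (some 5)).foldl pvStep0 (PySem.Dict.empty, 0)).1,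
       ((PySem.List.slice words none (some 5)).foldl pvStep0 (PySem.Dict.empty, 0)).2,
       ((PySem.List.slice words none (some 5)).foldl pvStep0 (PySem.Dict.empty, 0)).2)).2.2 = _
  have hsl : PySem.List.slice words none (some 5) = words.take 5 := by
    rw [show (5:Int) = ((5:Nat):Int) by norm_num, PySem.List.slice_to_natCast]
  rw [hsl]
  obtain ⟨hd0, hdups0⟩ := pvStep0_foldl (words.take 5) [] PySem.Dict.empty 0
    (fun w => by simp [PySem.Dict.getD_empty]) (by decide)
  simp only [List.nil_append] at hd0 hdups0
  have hwin0 : pvWin words 0 = words.take 5 := by simp [pvWin]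
  have key := pvStepB_foldl words (words.length - 6) 1
    ((words.take 5).foldl pvStep0 (PySem.Dict.empty, 0)).1
    ((words.take 5).foldl pvStep0 (PySem.Dict.empty, 0)).2
    ((words.take 5).foldl pvStep0 (PySem.Dict.empty, 0)).2
    (le_refl 1) (by omega)
    (by simpa [hwin0] using hd0) (by simpa [hwin0] using hdups0)
  push_cast at key
  rw [key, hdups0, ← hwin0]
  have hn : words.length - 5 = (words.length - 6) + 1 := by omega
  rw [hn, List.range_succ_eq_map, List.map_cons, List.sum_cons, List.map_map]
  congr 1
  refine congrArg List.sum (List.map_congr_left ?_)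
  intro t ht
  simp only [Function.comp_apply]
  rw [Nat.add_comm]

-- ===== VERDICT (by name: the statement is the Claim_ definition above) =====
theorem count_word_repetitions_py_spec : Claim_equal_count_word_repetitions_py := by
  intro words _
  unfold Spec_count_word_repetitions_py
  by_cases h : words.length ≤ 5
  · rw [A_eq_sum, show ((words.length : Int) - 5).toNat = 0 by omega]
    unfold count_word_repetitions_py_alt
    rw [if_pos h]
    simp
  · rw [A_eq_sum, B_eq_sum words h,
      show ((words.length : Int) - 5).toNat = words.length - 5 by omega]
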